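-- pv_equiv track=rewrite | github.com/chenyiqun/TourRank | TourRank_multiprocessing.py | get_groups_skip
-- ===== SOURCE A (Python) =====
-- def get_groups_skip(docs_id, to_n_groups=10, m_docs_per_group=10):
--
--     # doc_num = len(docs_id)
--     docs_groups = []
--     for i in range(to_n_groups):
--         cur_group = []
--         for j in range(m_docs_per_group):
--             cur_group.append(docs_id[j*to_n_groups + i])
--         docs_groups.append(cur_group)
--
--     return docs_groups
-- ===== SOURCE B (Python) =====
-- def get_groups_skip(docs_id, to_n_groups=10, m_docs_per_group=10):
--     groups = [[] for _ in range(to_n_groups)]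
--     for k in range(to_n_groups * m_docs_per_group):
--         groups[k % to_n_groups].append(docs_id[k])
--     return groups
-- ===== Notes on version B (the rewrite author's own statement) =====
-- stated objective: alternative
-- what changed: Replaced the nested column-major index computation (two loops reading element j*n+i) by a single round-robin dealing pass: build n empty groups up front, then one loop over the first n*m indices appending each element to the group given by its index modulo n.
-- outside the precondition, e.g. on get_groups_skip([], -1, -1): A returns [], B raises IndexError
import Mathlib
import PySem

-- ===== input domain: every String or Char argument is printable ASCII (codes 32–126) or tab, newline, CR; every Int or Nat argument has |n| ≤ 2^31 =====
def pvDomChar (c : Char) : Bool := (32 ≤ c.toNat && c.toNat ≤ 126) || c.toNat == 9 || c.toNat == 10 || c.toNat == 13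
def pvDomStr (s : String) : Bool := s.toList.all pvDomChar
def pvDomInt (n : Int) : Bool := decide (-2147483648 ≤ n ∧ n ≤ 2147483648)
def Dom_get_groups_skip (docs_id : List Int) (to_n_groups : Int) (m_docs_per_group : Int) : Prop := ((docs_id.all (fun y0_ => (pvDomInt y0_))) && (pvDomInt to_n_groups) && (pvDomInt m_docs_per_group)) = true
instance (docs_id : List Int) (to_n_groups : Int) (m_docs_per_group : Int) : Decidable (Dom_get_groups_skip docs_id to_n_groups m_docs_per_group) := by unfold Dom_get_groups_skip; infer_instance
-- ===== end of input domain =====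

-- B replaces A's nested column-major index computation by a single round-robin dealing
-- pass over range(to_n_groups*m_docs_per_group) (alternative decomposition, same cost).

-- ===== PORT A =====
-- literal transliteration of A; docs_id[j*to_n_groups + i] is ported with pyGetD:
-- Pre_get_groups_skip excludes every input on which that index is out of range (IndexError).
def get_groups_skip (docs_id : List Int) (to_n_groups : Int) (m_docs_per_group : Int) : List (List Int) :=
  (PySem.List.pyRange 0 to_n_groups 1).foldl
    (fun docs_groups i =>
      docs_groups ++
        [(PySem.List.pyRange 0 m_docs_per_group 1).foldl
          (fun cur_group j => cur_group ++ [PySem.List.pyGetD docs_id (j * to_n_groups + i) 0])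
          []])
    []

-- ===== PORT B =====
-- literal transliteration of Source B: n empty groups, then one dealing pass;
-- groups[k % n].append(docs_id[k]) becomes List.modify at index (k % n) (Python mod),
-- docs_id[k] ported with pyGetD (in range under Pre_get_groups_skip).
def get_groups_skip_alt (docs_id : List Int) (to_n_groups : Int) (m_docs_per_group : Int) : List (List Int) :=
  let groups := (PySem.List.pyRange 0 to_n_groups 1).map (fun _ => ([] : List Int))
  (PySem.List.pyRange 0 (to_n_groups * m_docs_per_group) 1).foldl
    (fun gs k =>
      gs.modify (PySem.Int.mod k to_n_groups).toNat
        (fun g => g ++ [PySem.List.pyGetD docs_id k 0]))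
    groups

-- ===== PRECONDITION & SPEC =====
-- Pre_ excludes (a) inputs where A raises IndexError (positive group counts with too few
-- docs), and (b) the corner to_n_groups < 0 ∧ m_docs_per_group < 0, where A accidentally
-- returns [] via an empty range while B's dealing pass raises IndexError on the empty
-- groups list (negative counts are outside the function's natural domain).
def Pre_get_groups_skip (docs_id : List Int) (to_n_groups : Int) (m_docs_per_group : Int) : Prop :=
  (0 ≤ to_n_groups ∨ 0 ≤ m_docs_per_group) ∧
  (to_n_groups ≤ 0 ∨ m_docs_per_group ≤ 0 ∨ to_n_groups * m_docs_per_group ≤ docs_id.length)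
instance (docs_id : List Int) (to_n_groups : Int) (m_docs_per_group : Int) : Decidable (Pre_get_groups_skip docs_id to_n_groups m_docs_per_group) := by unfold Pre_get_groups_skip; infer_instance

def pvWitness_get_groups_skip : List Int × Int × Int := ([1, 2, 3, 4, 5, 6], 2, 3)

def Spec_get_groups_skip (docs_id : List Int) (to_n_groups : Int) (m_docs_per_group : Int) (out : List (List Int)) : Prop := out = get_groups_skip_alt docs_id to_n_groups m_docs_per_group
instance (docs_id : List Int) (to_n_groups : Int) (m_docs_per_group : Int) (out : List (List Int)) : Decidable (Spec_get_groups_skip docs_id to_n_groups m_docs_per_group out) := by unfold Spec_get_groups_skip; infer_instance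

-- ===== CLAIM (what is proved, stated in full; the proofs are below) =====
def Claim_equal_get_groups_skip : Prop := ∀ (docs_id : List Int) (to_n_groups : Int) (m_docs_per_group : Int), Dom_get_groups_skip docs_id to_n_groups m_docs_per_group → Pre_get_groups_skip docs_id to_n_groups m_docs_per_group → Spec_get_groups_skip docs_id to_n_groups m_docs_per_group (get_groups_skip docs_id to_n_groups m_docs_per_group)

-- ===== LEMMAS AND PROOFS =====

-- append-accumulator fold is a map
theorem pv_foldl_append_singleton {α β : Type} (f : α → β) :
    ∀ (l : List α) (init : List β),
      l.foldl (fun acc x => acc ++ [f x]) init = init ++ l.map f := by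
  intro l
  induction l with
  | nil => intro init; simp
  | cons x xs ih => intro init; simp [List.foldl_cons, ih]

-- A in closed map form
theorem pv_A_eq (docs_id : List Int) (n m : Int) :
    get_groups_skip docs_id n m =
      (PySem.List.pyRange 0 n 1).map
        (fun i => (PySem.List.pyRange 0 m 1).map
          (fun j => PySem.List.pyGetD docs_id (j * n + i) 0)) := by
  unfold get_groups_skip
  rw [pv_foldl_append_singleton]
  simp only [List.nil_append]
  exact List.map_congr_left (fun i _ => by rw [pv_foldl_append_singleton]; simp)

-- modifying index t of a map over range(0,n) updates the function pointwise
theorem pv_modify_map_range (n : Int) (h : Int → List Int) (f : List Int → List Int)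
    (t : Nat) :
    ((PySem.List.pyRange 0 n 1).map h).modify t f =
      (PySem.List.pyRange 0 n 1).map (fun x => if x = (t : Int) then f (h x) else h x) := by
  apply List.ext_getElem
  · simp [List.length_modify]
  · intro j h1 h2
    have hj : j < (n - 0).toNat := by
      simpa [List.length_modify, PySem.List.length_pyRange_one] using h1
    rw [List.getElem_modify]
    simp only [List.getElem_map, PySem.List.getElem_pyRange_one, zero_add]
    by_cases hjt : t = j
    · subst hjt; simp
    · have : ¬ ((j : Int) = (t : Int)) := by omega
      simp [hjt, this]

-- residue of a block element: (q + t) % n = t when n ∣ q and 0 ≤ t < n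
theorem pv_mod_block (n q : Int) (hn : 0 < n) (hd : n ∣ q) (t : Int)
    (h0 : 0 ≤ t) (h1 : t < n) : PySem.Int.mod (q + t) n = t := by
  rcases hd with ⟨c, rfl⟩
  rw [PySem.Int.mod_eq_emod_of_pos hn]
  have : (n * c + t) % n = t % n := by
    rw [mul_comm]
    simpa [add_comm] using Int.add_mul_emod_self_left t n c
  rw [this, Int.emod_eq_of_lt h0 h1]

-- one block of n consecutive deals appends get (q+i) to group i, for i ≥ t
theorem pv_block (docs_id : List Int) (n q : Int) (hn : 0 < n) (hq : n ∣ q) :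
    ∀ (d : Nat) (t : Nat) (h : Int → List Int), (t : Int) + d = n →
      (PySem.List.pyRange (q + t) (q + n) 1).foldl
        (fun gs k => gs.modify (PySem.Int.mod k n).toNat
          (fun g => g ++ [PySem.List.pyGetD docs_id k 0]))
        ((PySem.List.pyRange 0 n 1).map h)
      = (PySem.List.pyRange 0 n 1).map
          (fun i => if (t : Int) ≤ i then h i ++ [PySem.List.pyGetD docs_id (q + i) 0] else h i) := by
  intro d
  induction d with
  | zero =>
    intro t h htd
    have hnil : PySem.List.pyRange (q + t) (q + n) 1 = [] := by
      apply PySem.List.pyRange_one_eq_nil; omega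
    rw [hnil]
    simp only [List.foldl_nil]
    apply List.map_congr_left
    intro i hi
    have := (PySem.List.mem_pyRange_one).1 hi
    have : ¬ ((t : Int) ≤ i) := by omega
    simp [this]
  | succ d ih =>
    intro t h htd
    have htn : (t : Int) < n := by omega
    have hcons : PySem.List.pyRange (q + t) (q + n) 1 =
        (q + t) :: PySem.List.pyRange (q + t + 1) (q + n) 1 := by
      apply PySem.List.pyRange_one_cons; omega
    rw [hcons, List.foldl_cons]
    have hmod : PySem.Int.mod (q + (t : Int)) n = (t : Int) :=
      pv_mod_block n q hn hq t (by positivity) htn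
    rw [hmod]
    have htoNat : ((t : Int)).toNat = t := Int.toNat_natCast t
    rw [htoNat, pv_modify_map_range n h _ t]
    have hstep : q + (t : Int) + 1 = q + ((t + 1 : Nat) : Int) := by push_cast; ring
    rw [hstep, ih (t + 1) _ (by push_cast; omega)]
    apply List.map_congr_left
    intro i hi
    have hmem := (PySem.List.mem_pyRange_one).1 hi
    by_cases hit : i = (t : Int)
    · subst hit
      have h1 : ¬ (((t + 1 : Nat) : Int) ≤ (t : Int)) := by push_cast; omega
      rw [if_neg h1, if_pos rfl, if_pos (le_refl _)]
    · simp only [if_neg hit]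
      have hiff : (((t + 1 : Nat) : Int) ≤ i) ↔ ((t : Int) ≤ i) := by push_cast; omega
      by_cases hle : (t : Int) ≤ i
      · rw [if_pos (hiff.2 hle), if_pos hle]
      · rw [if_neg (fun h' => hle (hiff.1 h')), if_neg hle]

-- r rounds of dealing append the first r column entries to every group
theorem pv_deal (docs_id : List Int) (n : Int) (hn : 0 < n) :
    ∀ (r : Nat) (g : Int → List Int),
      (PySem.List.pyRange 0 (n * r) 1).foldl
        (fun gs k => gs.modify (PySem.Int.mod k n).toNat
          (fun g => g ++ [PySem.List.pyGetD docs_id k 0]))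
        ((PySem.List.pyRange 0 n 1).map g)
      = (PySem.List.pyRange 0 n 1).map
          (fun i => g i ++ (PySem.List.pyRange 0 (r : Int) 1).map
            (fun j => PySem.List.pyGetD docs_id (j * n + i) 0)) := by
  intro r
  induction r with
  | zero =>
    intro g
    have h1 : PySem.List.pyRange 0 (n * (0 : Nat)) 1 = [] := by
      apply PySem.List.pyRange_one_eq_nil; simp
    have h2 : PySem.List.pyRange 0 ((0 : Nat) : Int) 1 = [] := by
      apply PySem.List.pyRange_one_eq_nil; simp
    rw [h1, h2]; simp
  | succ r ih =>
    intro g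
    have hr0 : (0 : Int) ≤ n * r := by positivity
    have hsplit : PySem.List.pyRange 0 (n * ((r + 1 : Nat) : Int)) 1 =
        PySem.List.pyRange 0 (n * r) 1 ++ PySem.List.pyRange (n * r) (n * ((r + 1 : Nat) : Int)) 1 := by
      apply PySem.List.pyRange_one_append 0 (n * r) _ hr0
      push_cast; nlinarith
    rw [hsplit, List.foldl_append, ih]
    have hq : n ∣ n * (r : Int) := Dvd.intro _ rfl
    have hshape : PySem.List.pyRange (n * r) (n * ((r + 1 : Nat) : Int)) 1 =
        PySem.List.pyRange (n * r + ((0 : Nat) : Int)) (n * r + n) 1 := by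
      congr 1 <;> push_cast <;> ring
    rw [hshape, pv_block docs_id n (n * r) hn hq n.toNat 0
      (fun i => g i ++ (PySem.List.pyRange 0 (r : Int) 1).map
        (fun j => PySem.List.pyGetD docs_id (j * n + i) 0))
      (by push_cast; omega)]
    apply List.map_congr_left
    intro i hi
    have hmem := (PySem.List.mem_pyRange_one).1 hi
    have h0i : ((0 : Nat) : Int) ≤ i := by push_cast; omega
    simp only [h0i, if_pos]
    have hsucc : PySem.List.pyRange 0 ((r + 1 : Nat) : Int) 1 =
        PySem.List.pyRange 0 (r : Int) 1 ++ [(r : Int)] := by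
      have : ((r + 1 : Nat) : Int) = (r : Int) + 1 := by push_cast; ring
      rw [this]
      apply PySem.List.pyRange_one_succ_right; positivity
    rw [hsucc]
    simp [mul_comm]

-- ===== VERDICT (by name: the statement is the Claim_ definition above) =====
theorem get_groups_skip_spec : Claim_equal_get_groups_skip := by
  intro docs_id n m _ hpre
  unfold Spec_get_groups_skip
  rw [pv_A_eq]
  unfold get_groups_skip_alt
  rcases le_or_gt n 0 with hn | hn
  · -- n ≤ 0: A is []; B's range(n*m) is empty and groups is []
    have hnm : n * m ≤ 0 := by
      rcases hpre.1 with h | h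
      · have : n = 0 := le_antisymm hn h; simp [this]
      · exact mul_nonpos_of_nonpos_of_nonneg hn h
    have h1 : PySem.List.pyRange 0 n 1 = [] := PySem.List.pyRange_one_eq_nil (by omega)
    have h2 : PySem.List.pyRange 0 (n * m) 1 = [] := PySem.List.pyRange_one_eq_nil (by omega)
    simp [h1, h2]
  · rcases le_or_gt m 0 with hm | hm
    · -- n > 0, m ≥ 0 vacuous columns: both sides are n empty groups
      have h2 : PySem.List.pyRange 0 (n * m) 1 = [] :=
        PySem.List.pyRange_one_eq_nil (by nlinarith)
      have h3 : PySem.List.pyRange 0 m 1 = [] := PySem.List.pyRange_one_eq_nil (by omega)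
      simp [h2, h3]
    · -- n > 0, m > 0: the dealing lemma with r = m.toNat rounds
      have hm' : ((m.toNat : Nat) : Int) = m := Int.toNat_of_nonneg (by omega)
      have hrw : n * m = n * ((m.toNat : Nat) : Int) := by rw [hm']
      rw [hrw, pv_deal docs_id n hn m.toNat (fun _ => ([] : List Int))]
      simp [hm']
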